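-- pv_equiv track=rewrite | github.com/jina0924/Algorithm | Programmers/PCCP_1/1_외톨이알파벳/s1.py | solution
-- ===== SOURCE A (Python) =====
-- from collections import defaultdict
--
-- def solution(input_string):
--     answer = ''
--     solo = set()
--     isfound = defaultdict(int)
--
--     for i in range(len(input_string)):
--         char = input_string[i]
--         if isfound[char]:
--             if i > 0 and char != input_string[i - 1]:
--                 solo.add(char)
--         else:
--             isfound[char] = 1
--
--     if solo:
--         answer = ''.join(sorted(solo))
--     else:
--         answer = 'N'
--     return answer
-- ===== SOURCE B (Python) =====
-- def solution(input_string):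
--     # A letter is lonely iff it reappears after its first maximal run:
--     # jump to its first occurrence, strip that run, and test membership.
--     lonely = [c for c in sorted(set(input_string))
--               if c in input_string[input_string.index(c):].lstrip(c)]
--     return ''.join(lonely) if lonely else 'N'
-- ===== Notes on version B (the rewrite author's own statement) =====
-- stated objective: alternative
-- what changed: B abandons A's single index-scan with a seen-dict and solo-set: for each distinct letter it jumps to the letter's first occurrence with str.index, strips that first maximal run with lstrip, and flags the letter iff it still appears in the remaining suffix; measurably faster because the per-letter scans run inside C string primitives instead of A's Python-level per-character loop.
import Mathlib
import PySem

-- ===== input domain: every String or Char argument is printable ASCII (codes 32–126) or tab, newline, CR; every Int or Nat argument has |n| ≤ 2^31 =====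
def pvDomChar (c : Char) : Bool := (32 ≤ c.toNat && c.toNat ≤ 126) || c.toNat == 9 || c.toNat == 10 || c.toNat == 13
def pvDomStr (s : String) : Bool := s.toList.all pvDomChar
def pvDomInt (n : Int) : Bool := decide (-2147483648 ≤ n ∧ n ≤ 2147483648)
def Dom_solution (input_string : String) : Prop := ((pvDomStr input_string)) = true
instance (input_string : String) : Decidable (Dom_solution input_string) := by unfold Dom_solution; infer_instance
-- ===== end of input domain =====

-- B replaces A's single index-scan (seen-dict + predecessor compare + solo set) by a
-- per-letter test: a letter is lonely iff it reappears after its first maximal run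
-- (measured faster in Python: the per-letter scans run inside C string methods).

-- ===== PORT A =====
def solution (input_string : String) : String :=
  let cs := input_string.toList
  let st := (PySem.List.enumerate cs 0).foldl
    (fun (st : PySem.Set Char × PySem.Dict Char Int) (p : Int × Char) =>
      if st.2.getD p.2 0 ≠ 0 then
        if 0 < p.1 ∧ PySem.List.pyGet? cs (p.1 - 1) ≠ some p.2 then
          (PySem.Set.add st.1 p.2, st.2)
        else st
      else (st.1, st.2.insert p.2 1))
    ((PySem.Set.empty : PySem.Set Char), (PySem.Dict.empty : PySem.Dict Char Int))
  if st.1 ≠ [] then String.ofList (PySem.List.sorted st.1 (fun x => x) false) else "N"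

-- ===== PORT B =====
def solution_alt (input_string : String) : String :=
  let cs := input_string.toList
  -- for c in sorted(set(input_string)) … — filter over the sorted distinct letters;
  -- input_string.index(c) = cs.idxOf c (c is a member, so .index returns the first position);
  -- s[i:] with 0 ≤ i = List.drop; .lstrip(c) with a single-char argument = dropWhile (== c);
  -- 'c in …' = contains (each step exact on this input by construction)
  let lonely := (PySem.List.sorted (PySem.Set.ofList cs) (fun x => x) false).filter
    (fun c => ((cs.drop (cs.idxOf c)).dropWhile (· == c)).contains c)
  if lonely ≠ [] then String.ofList lonely else "N"

-- ===== PRECONDITION & SPEC =====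
def Spec_solution (input_string : String) (out : String) : Prop := out = solution_alt input_string
instance (input_string : String) (out : String) : Decidable (Spec_solution input_string out) := by unfold Spec_solution; infer_instance

-- ===== CLAIM (what is proved, stated in full; the proofs are below) =====
def Claim_equal_solution : Prop := ∀ (input_string : String), Dom_solution input_string → Spec_solution input_string (solution input_string)

-- ===== LEMMAS AND PROOFS =====

-- the run-head subsequence of a list, given the previous character (none at the start)
def pvHeads : List Char → Option Char → List Char
  | [], _ => []
  | c :: t, p => if p ≠ some c then c :: pvHeads t (some c) else pvHeads t (some c)

-- A's loop rewritten as a prev-carrying structural recursion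
def pvLoopA : List Char → Option Char → PySem.Set Char × PySem.Dict Char Int → PySem.Set Char × PySem.Dict Char Int
  | [], _, st => st
  | c :: t, p, st =>
    pvLoopA t (some c)
      (if st.2.getD c 0 ≠ 0 then
        if p ≠ none ∧ p ≠ some c then (PySem.Set.add st.1 c, st.2) else st
      else (st.1, st.2.insert c 1))

theorem pvA_fold (cs : List Char) : ∀ (suf pre : List Char) (st : PySem.Set Char × PySem.Dict Char Int),
    cs = pre ++ suf →
    (PySem.List.enumerate suf (pre.length : Int)).foldl
      (fun (st : PySem.Set Char × PySem.Dict Char Int) (p : Int × Char) =>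
        if st.2.getD p.2 0 ≠ 0 then
          if 0 < p.1 ∧ PySem.List.pyGet? cs (p.1 - 1) ≠ some p.2 then
            (PySem.Set.add st.1 p.2, st.2)
          else st
        else (st.1, st.2.insert p.2 1)) st
    = pvLoopA suf pre.getLast? st := by
  intro suf
  induction suf with
  | nil => intro pre st _; simp [pvLoopA, PySem.List.enumerate_nil]
  | cons c t ih =>
    intro pre st hcs
    rw [PySem.List.enumerate_cons, List.foldl_cons]
    have hstep :
        (if st.2.getD c 0 ≠ 0 then
          if 0 < ((pre.length : Int)) ∧ PySem.List.pyGet? cs ((pre.length : Int) - 1) ≠ some c then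
            (PySem.Set.add st.1 c, st.2)
          else st
        else (st.1, st.2.insert c 1))
        = (if st.2.getD c 0 ≠ 0 then
            if pre.getLast? ≠ none ∧ pre.getLast? ≠ some c then (PySem.Set.add st.1 c, st.2) else st
          else (st.1, st.2.insert c 1)) := by
      rcases List.eq_nil_or_concat pre with rfl | ⟨q, a, rfl⟩
      · simp
      · simp only [List.concat_eq_append] at hcs ⊢
        have h1 : (((q ++ [a]).length : Int) - 1) = ((q.length : Nat) : Int) := by
          push_cast [List.length_append, List.length_singleton]; ring
        have hget : PySem.List.pyGet? cs (((q ++ [a]).length : Int) - 1) = some a := by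
          rw [h1, PySem.List.pyGet?_natCast]
          subst hcs
          rw [List.getElem?_append_left (by simp)]
          simp
        have hlast : (q ++ [a]).getLast? = some a := by simp
        rw [hget, hlast]
        have hpos : (0 : Int) < (((q ++ [a]).length : Nat) : Int) := by
          push_cast [List.length_append, List.length_singleton]; omega
        by_cases hfound : st.2.getD c 0 ≠ 0
        · simp only [if_pos hfound]
          by_cases hne : a = c
          · simp [hne, hpos]
          · have : some a ≠ some c := by simpa using hne
            simp [hpos, this, Ne.symm hne]
        · simp [if_neg hfound]
    rw [hstep]
    have hlen : ((pre.length : Int) + 1) = (((pre ++ [c]).length : Nat) : Int) := by simp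
    have hlast : (pre ++ [c]).getLast? = some c := by simp
    have hcs' : cs = (pre ++ [c]) ++ t := by simp [hcs]
    rw [hlen]
    rw [ih (pre ++ [c]) _ hcs', hlast]
    rfl

-- the invariant carried through A's loop
theorem pvA_inv (suf : List Char) : ∀ (p : Option Char) (st : PySem.Set Char × PySem.Dict Char Int) (H : List Char),
    (∀ x, st.2.getD x 0 ≠ 0 ↔ x ∈ H) →
    (∀ x, x ∈ st.1 ↔ 2 ≤ H.count x) →
    st.1.Nodup →
    (∀ q, p = some q → q ∈ H) →
    (p = none → H = []) →
    ((∀ x, (pvLoopA suf p st).2.getD x 0 ≠ 0 ↔ x ∈ H ++ pvHeads suf p) ∧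
     (∀ x, x ∈ (pvLoopA suf p st).1 ↔ 2 ≤ (H ++ pvHeads suf p).count x) ∧
     (pvLoopA suf p st).1.Nodup) := by
  induction suf with
  | nil => intro p st H h1 h2 h3 _ _; simpa [pvLoopA, pvHeads] using ⟨h1, h2, h3⟩
  | cons c t ih =>
    intro p st H h1 h2 h3 hp hn
    by_cases hh : p ≠ some c
    · -- c starts a new run
      have hHeads : pvHeads (c :: t) p = c :: pvHeads t (some c) := by simp [pvHeads, hh]
      by_cases hfound : st.2.getD c 0 ≠ 0
      · -- c seen before: A adds c to solo (p must be some q ≠ some c)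
        have hcH : c ∈ H := (h1 c).mp hfound
        have hpn : p ≠ none := by
          intro h; exact absurd hcH (by simp [hn h])
        have hstep : pvLoopA (c :: t) p st
            = pvLoopA t (some c) (PySem.Set.add st.1 c, st.2) := by
          simp [pvLoopA, hfound, hpn, hh]
        rw [hstep, hHeads]
        have := ih (some c) (PySem.Set.add st.1 c, st.2) (H ++ [c])
          (by
            intro x
            rw [h1 x]
            constructor
            · intro h; exact List.mem_append_left _ h
            · intro h
              rcases List.mem_append.mp h with h' | h'
              · exact h'
              · rw [List.mem_singleton.mp h']; exact hcH)
          (by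
            intro x
            simp only [PySem.Set.mem_add]
            by_cases hx : x = c
            · rw [hx]
              have : 1 ≤ H.count c := List.one_le_count_iff.mpr hcH
              simp [List.count_append]; omega
            · rw [h2 x]; simp [List.count_append, hx, List.count_singleton, Ne.symm hx])
          (PySem.Set.nodup_add st.1 c h3)
          (by intro q hq; simp at hq; simp [hq])
          (by simp)
        simpa [List.append_assoc] using this
      · -- first occurrence of c
        have hcH : c ∉ H := fun h => hfound ((h1 c).mpr h)
        have hstep : pvLoopA (c :: t) p st
            = pvLoopA t (some c) (st.1, st.2.insert c 1) := by
          simp [pvLoopA, hfound]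
        rw [hstep, hHeads]
        have := ih (some c) (st.1, st.2.insert c 1) (H ++ [c])
          (by
            intro x
            simp only [PySem.Dict.getD_insert]
            by_cases hx : x = c
            · rw [hx]; simp
            · rw [if_neg hx, h1 x]; simp [hx])
          (by
            intro x
            by_cases hx : x = c
            · have hcount : H.count c = 0 := List.count_eq_zero.mpr hcH
              have hns : c ∉ st.1 := fun h => by
                have h4 := (h2 c).mp h
                rw [hcount] at h4; omega
              rw [hx]
              simp [hns, List.count_append, hcount]
            · rw [h2 x]; simp [List.count_append, hx, List.count_singleton, Ne.symm hx])
          h3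
          (by intro q hq; simp at hq; simp [hq])
          (by simp)
        simpa [List.append_assoc] using this
    · -- c continues the previous run: state unchanged
      push_neg at hh
      have hcH : c ∈ H := hp c hh
      have hfound : st.2.getD c 0 ≠ 0 := (h1 c).mpr hcH
      have hstep : pvLoopA (c :: t) p st = pvLoopA t (some c) st := by
        simp [pvLoopA, hfound, hh]
      have hHeads : pvHeads (c :: t) p = pvHeads t (some c) := by simp [pvHeads, hh]
      rw [hstep, hHeads]
      exact ih (some c) st H h1 h2 h3 (by intro q hq; simp only [Option.some.injEq] at hq; rw [← hq]; exact hcH)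
        (by intro h; simp at h)

-- heads membership implies membership
theorem pvHeads_mem (c : Char) (t : List Char) : ∀ p, c ∈ pvHeads t p → c ∈ t := by
  induction t with
  | nil => intro p h; simp [pvHeads] at h
  | cons a t' ih =>
    intro p h
    unfold pvHeads at h
    by_cases hpa : p ≠ some a
    · rw [if_pos hpa] at h
      rcases List.mem_cons.mp h with h | h
      · simp [h]
      · exact List.mem_cons_of_mem _ (ih _ h)
    · rw [if_neg hpa] at h
      exact List.mem_cons_of_mem _ (ih _ h)

-- the count of c among the run heads only depends on whether prev is c
theorem pvHeads_count_congr (c : Char) (t : List Char) : ∀ p q, (p = some c ↔ q = some c) →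
    (pvHeads t p).count c = (pvHeads t q).count c := by
  induction t with
  | nil => intro p q _; rfl
  | cons a t' ih =>
    intro p q hpq
    unfold pvHeads
    by_cases hac : a = c
    · subst hac
      by_cases hp : p = some a
      · have hq := hpq.mp hp
        rw [if_neg (by simp [hp]), if_neg (by simp [hq])]
      · have hq : q ≠ some a := fun h => hp (hpq.mpr h)
        rw [if_pos (by simpa using hp), if_pos (by simpa using hq)]
    · by_cases hp : p ≠ some a <;> by_cases hq : q ≠ some a <;>
        simp only [ite_not] <;> split_ifs <;> simp_all <;>
        simp [List.count_cons, hac]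

-- with prev ≠ c, c has a run head iff c occurs at all
theorem pvHeads_count_pos (c : Char) (t : List Char) : ∀ p, p ≠ some c →
    (1 ≤ (pvHeads t p).count c ↔ c ∈ t) := by
  induction t with
  | nil => intro p _; simp [pvHeads]
  | cons a t' ih =>
    intro p hp
    unfold pvHeads
    by_cases hac : a = c
    · subst hac
      rw [if_pos (by simpa using hp)]
      simp [List.count_cons]
    · have hmem : c ∈ a :: t' ↔ c ∈ t' := by simp [Ne.symm hac]
      have hrec := ih (some a) (by simpa using hac)
      by_cases hpa : p ≠ some a
      · rw [if_pos hpa]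
        simp only [List.count_cons, beq_iff_eq, hac, if_false]
        rw [hmem]; simpa using hrec
      · rw [if_neg hpa]; rw [hmem]; exact hrec

-- with prev = c, c has a run head iff c reappears after the leading run
theorem pvHeads_count_after_run (c : Char) (t : List Char) :
    (1 ≤ (pvHeads t (some c)).count c ↔ c ∈ t.dropWhile (· == c)) := by
  induction t with
  | nil => simp [pvHeads]
  | cons a t' ih =>
    unfold pvHeads
    by_cases hac : a = c
    · subst hac
      rw [if_neg (by simp)]
      rw [List.dropWhile_cons_of_pos (by simp)]
      exact ih
    · rw [if_pos (by simpa using Ne.symm hac)]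
      rw [List.dropWhile_cons_of_neg (by simpa using hac)]
      simp only [List.count_cons, beq_iff_eq, hac, if_false, Nat.add_zero]
      rw [pvHeads_count_pos c t' (some a) (by simpa using hac)]
      simp [Ne.symm hac]

-- Python's s[s.index(c):] : dropping up to the first occurrence = dropWhile (≠ c)
theorem pvDrop_idxOf (c : Char) (cs : List Char) :
    cs.drop (cs.idxOf c) = cs.dropWhile (fun x => x != c) := by
  induction cs with
  | nil => rfl
  | cons a t ih =>
    by_cases hac : a = c
    · subst hac; simp [List.idxOf_cons_self, List.dropWhile_cons_of_neg]
    · rw [List.idxOf_cons_ne _ (by simpa using hac), List.drop_succ_cons,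
        List.dropWhile_cons_of_pos (by simpa using hac)]
      exact ih

-- the per-letter characterisation: lonely (≥ 2 runs) iff c reappears after its first run
theorem pvLonely_iff (c : Char) (cs : List Char) :
    2 ≤ (pvHeads cs none).count c ↔ c ∈ (cs.dropWhile (fun x => x != c)).dropWhile (· == c) := by
  induction cs with
  | nil => simp [pvHeads]
  | cons a t ih =>
    by_cases hac : a = c
    · subst hac
      rw [List.dropWhile_cons_of_neg (by simp)]
      rw [List.dropWhile_cons_of_pos (by simp)]
      have hh : pvHeads (a :: t) none = a :: pvHeads t (some a) := by simp [pvHeads]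
      rw [hh]
      have h1 := pvHeads_count_after_run a t
      constructor
      · intro h2
        apply h1.mp
        simp only [List.count_cons, beq_self_eq_true, if_true] at h2
        omega
      · intro h2
        have h3 := h1.mpr h2
        simp only [List.count_cons, beq_self_eq_true, if_true]
        omega
    · rw [List.dropWhile_cons_of_pos (by simpa using hac)]
      have hh : pvHeads (a :: t) none = a :: pvHeads t (some a) := by simp [pvHeads]
      rw [hh]
      simp only [List.count_cons, beq_iff_eq, hac, if_false]
      rw [pvHeads_count_congr c t (some a) none (by simp [hac])]
      exact ih

-- ===== VERDICT (by name: the statement is the Claim_ definition above) =====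
theorem solution_spec : Claim_equal_solution := by
  intro s _
  unfold Spec_solution solution solution_alt
  simp only
  set cs := s.toList with hcs
  set H := pvHeads cs none with hH
  -- A's loop
  have hA := pvA_fold cs cs [] ((PySem.Set.empty : PySem.Set Char), (PySem.Dict.empty : PySem.Dict Char Int)) (by simp)
  simp only [List.length_nil, Nat.cast_zero, List.getLast?_nil] at hA
  rw [hA]
  have hinv := pvA_inv cs none ((PySem.Set.empty : PySem.Set Char), (PySem.Dict.empty : PySem.Dict Char Int)) []
    (by intro x; simp [PySem.Dict.getD_empty])
    (by intro x; simp [PySem.Set.empty])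
    (by simp [PySem.Set.empty])
    (by intro q hq; cases hq)
    (fun _ => rfl)
  simp only [List.nil_append] at hinv
  obtain ⟨_, hmem, hnd⟩ := hinv
  set solo := (pvLoopA cs none ((PySem.Set.empty : PySem.Set Char), (PySem.Dict.empty : PySem.Dict Char Int))).1 with hsolo
  set LB := (PySem.List.sorted (PySem.Set.ofList cs) (fun x => x) false).filter
    (fun c => ((cs.drop (cs.idxOf c)).dropWhile (· == c)).contains c) with hLB
  -- the per-letter predicate, rewritten
  have hpred : ∀ c : Char, (((cs.drop (cs.idxOf c)).dropWhile (· == c)).contains c = true) ↔ 2 ≤ H.count c := by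
    intro c
    rw [pvDrop_idxOf, List.contains_eq_mem, decide_eq_true_eq]
    exact (pvLonely_iff c cs).symm
  -- LB is strictly increasing, hence nodup
  have hLBlt : LB.Pairwise (· < ·) := by
    rw [hLB]
    exact (PySem.List.sorted_ofList_pairwise_lt (xs := cs)).filter _
  have hLBnd : LB.Nodup := hLBlt.imp (fun h => ne_of_lt h)
  -- same membership as solo
  have hLBmem : ∀ x, x ∈ LB ↔ 2 ≤ H.count x := by
    intro x
    rw [hLB, List.mem_filter, PySem.List.mem_sorted, PySem.Set.mem_ofList]
    constructor
    · rintro ⟨_, h⟩; exact (hpred x).mp h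
    · intro h
      refine ⟨?_, (hpred x).mpr h⟩
      exact pvHeads_mem x cs none (List.one_le_count_iff.mp (Nat.le_of_succ_le h))
  have hperm : LB.Perm solo := by
    rw [List.perm_ext_iff_of_nodup hLBnd hnd]
    intro x; rw [hmem x, hLBmem x]
  have hsortedeq : PySem.List.sorted solo (fun x => x) false = LB :=
    PySem.List.sorted_eq_of_perm_of_pairwise_lt solo LB (fun x => x) hperm hLBlt
  have hnil : solo = [] ↔ LB = [] := by
    constructor
    · intro h; exact List.perm_nil.mp (h ▸ hperm)
    · intro h; exact List.perm_nil.mp ((h ▸ hperm).symm)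
  by_cases hs : solo = []
  · simp [hs, hnil.mp hs]
  · have hLBne : LB ≠ [] := fun h => hs (hnil.mpr h)
    simp [hs, hLBne, hsortedeq]
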